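-- pv_equiv track=rewrite | github.com/yannh/csv2bib | csv2bib.py | parse_reference
-- ===== SOURCE A (Python) =====
-- def parse_reference(row, attributes_order):
--   ref = {}
--   for i, col in enumerate(row):
--     # Skip columns for which we did not recognise the header
--     if i not in attributes_order:
--       continue
--
--     col = col.strip()
--
--     if len(col) == 0:
--       continue
--
--     ref[attributes_order[i]] = col
--
--   return ref
-- ===== SOURCE B (Python) =====
-- def parse_reference(row, attributes_order):
--   ref = {}
--   # Traverse the recognized header columns (ascending index) instead of the row
--   for i in sorted(attributes_order):
--     if 0 <= i < len(row):
--       col = row[i].strip()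
--       if col:
--         ref[attributes_order[i]] = col
--   return ref
-- ===== Notes on version B (the rewrite author's own statement) =====
-- stated objective: alternative
-- what changed: B iterates over the sorted recognized column indices of the header mapping (with an explicit bounds guard) instead of enumerating the whole row and testing each position for membership in the mapping.
import Mathlib
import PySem

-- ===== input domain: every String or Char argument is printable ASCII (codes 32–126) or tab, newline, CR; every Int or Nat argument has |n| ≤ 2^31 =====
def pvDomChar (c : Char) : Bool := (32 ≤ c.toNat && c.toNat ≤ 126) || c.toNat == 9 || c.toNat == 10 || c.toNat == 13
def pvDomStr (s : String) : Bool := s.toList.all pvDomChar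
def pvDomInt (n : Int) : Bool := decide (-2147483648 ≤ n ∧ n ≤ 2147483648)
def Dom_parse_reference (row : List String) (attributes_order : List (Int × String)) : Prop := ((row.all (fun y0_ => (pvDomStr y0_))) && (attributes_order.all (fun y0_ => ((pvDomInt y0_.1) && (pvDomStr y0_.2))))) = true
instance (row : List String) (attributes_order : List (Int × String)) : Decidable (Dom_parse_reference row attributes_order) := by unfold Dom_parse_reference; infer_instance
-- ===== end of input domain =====

-- B traverses the sorted recognized column indices of the header mapping (with a bounds
-- guard) instead of enumerating the row and testing membership: an alternative decomposition.

-- ===== PORT A =====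
def parse_reference (row : List String) (attributes_order : List (Int × String)) : List (String × String) :=
  ((PySem.List.enumerate row).foldl (fun ref p =>
      match (PySem.Dict.mk attributes_order).get? p.1 with
      | none => ref                               -- i not in attributes_order: continue
      | some name =>
        let col := PySem.Str.strip p.2
        if PySem.Str.len col == 0 then ref        -- continue
        else ref.insert name col)
    PySem.Dict.empty).items

-- ===== PORT B =====
def parse_reference_alt (row : List String) (attributes_order : List (Int × String)) : List (String × String) :=
  -- sorted(attributes_order): the dict's keys — the distinct keys in first-occurrence order — sorted
  ((PySem.List.sorted (PySem.List.dedup (attributes_order.map Prod.fst)) (fun k => k)).foldl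
    (fun ref i =>
      if 0 ≤ i ∧ i < (row.length : Int) then
        match PySem.List.pyGet? row i with        -- row[i]; in range by the guard
        | none => ref
        | some s =>
          let col := PySem.Str.strip s
          if col == "" then ref
          else
            match (PySem.Dict.mk attributes_order).get? i with  -- attributes_order[i]; i is a key
            | none => ref
            | some name => ref.insert name col
      else ref)
    PySem.Dict.empty).items

-- ===== PRECONDITION & SPEC =====
def Spec_parse_reference (row : List String) (attributes_order : List (Int × String)) (out : List (String × String)) : Prop := out = parse_reference_alt row attributes_order
instance (row : List String) (attributes_order : List (Int × String)) (out : List (String × String)) : Decidable (Spec_parse_reference row attributes_order out) := by unfold Spec_parse_reference; infer_instance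

-- ===== CLAIM (what is proved, stated in full; the proofs are below) =====
def Claim_equal_parse_reference : Prop := ∀ (row : List String) (attributes_order : List (Int × String)), Dom_parse_reference row attributes_order → Spec_parse_reference row attributes_order (parse_reference row attributes_order)

-- ===== LEMMAS AND PROOFS =====

-- the common loop body both folds reduce to, at an index that is a recognized key and in range
def pvBody (row : List String) (ao : List (Int × String))
    (ref : PySem.Dict String String) (i : Int) : PySem.Dict String String :=
  match (PySem.Dict.mk ao).get? i with
  | none => ref
  | some name =>
    let col := PySem.Str.strip (PySem.List.pyGetD row i "")
    if PySem.Str.len col == 0 then ref else ref.insert name col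

-- A's emptiness test 'len(col) == 0' and B's falsiness test agree
theorem pv_len_beq_zero (c : String) : (PySem.Str.len c == 0) = (c == "") := by
  rcases c with ⟨l⟩
  cases l
  all_goals simp [PySem.Str.len_eq]

-- A's index list (row positions that are recognized keys, ascending) equals
-- B's index list (sorted distinct keys restricted to row range): both are the
-- strictly increasing enumeration of the same set of integers.
theorem pv_lists_eq (row : List String) (ao : List (Int × String)) :
    (PySem.List.pyRange 0 (row.length : Int)).filter
        (fun i => ((PySem.Dict.mk ao).get? i).isSome)
      = (PySem.List.sorted (PySem.List.dedup (ao.map Prod.fst)) (fun k => k)).filter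
        (fun i => decide (0 ≤ i ∧ i < (row.length : Int))) := by
  have h1 : (List.Pairwise (· < ·)) ((PySem.List.pyRange 0 (row.length : Int)).filter
      (fun i => ((PySem.Dict.mk ao).get? i).isSome)) :=
    (PySem.List.pairwise_lt_pyRange_one 0 (row.length : Int)).filter _
  have h2 : (List.Pairwise (· < ·)) ((PySem.List.sorted (PySem.List.dedup (ao.map Prod.fst)) (fun k => k)).filter
      (fun i => decide (0 ≤ i ∧ i < (row.length : Int)))) := by
    rw [PySem.List.dedup_eq_ofList]
    exact (PySem.List.sorted_ofList_pairwise_lt _).filter _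
  have hmem : ∀ a : Int, (a ∈ (PySem.List.pyRange 0 (row.length : Int)).filter
      (fun i => ((PySem.Dict.mk ao).get? i).isSome)) ↔
      (a ∈ (PySem.List.sorted (PySem.List.dedup (ao.map Prod.fst)) (fun k => k)).filter
      (fun i => decide (0 ≤ i ∧ i < (row.length : Int)))) := by
    intro a
    have hk : ((PySem.Dict.mk ao).get? a).isSome = true ↔ a ∈ ao.map Prod.fst := by
      rw [Option.isSome_iff_ne_none, ne_eq, PySem.Dict.get?_eq_none_iff_not_mem_keys,
        PySem.Dict.keys_mk]
      tauto
    simp [List.mem_filter, PySem.List.mem_pyRange_one, PySem.List.mem_sorted, hk]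
    tauto
  exact List.Perm.eq_of_pairwise (fun a b _ _ hab hba => by omega) h1 h2
    ((List.perm_ext_iff_of_nodup (h1.imp (fun h => ne_of_lt h))
      (h2.imp (fun h => ne_of_lt h))).mpr hmem)

-- A's fold, rewritten as a fold of the common body over its filtered index list
theorem pv_A_eq (row : List String) (ao : List (Int × String)) :
    parse_reference row ao
      = (((PySem.List.pyRange 0 (row.length : Int)).filter
          (fun i => ((PySem.Dict.mk ao).get? i).isSome)).foldl (pvBody row ao)
          PySem.Dict.empty).items := by
  unfold parse_reference
  congr 1
  rw [PySem.List.enumerate_eq_map_pyRange row "", List.foldl_map, List.foldl_filter]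
  simp only [PySem.List.len_eq]
  apply PySem.List.foldl_congr_mem
  intro acc x _
  by_cases h : ((PySem.Dict.mk ao).get? x).isSome
  · rcases Option.isSome_iff_exists.mp h with ⟨name, hn⟩
    simp [pvBody, hn]
  · simp only [Option.not_isSome_iff_eq_none] at h
    simp [h]

-- B's fold, rewritten as a fold of the common body over its filtered index list
theorem pv_B_eq (row : List String) (ao : List (Int × String)) :
    parse_reference_alt row ao
      = (((PySem.List.sorted (PySem.List.dedup (ao.map Prod.fst)) (fun k => k)).filter
          (fun i => decide (0 ≤ i ∧ i < (row.length : Int)))).foldl (pvBody row ao)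
          PySem.Dict.empty).items := by
  unfold parse_reference_alt
  congr 1
  rw [List.foldl_filter]
  apply PySem.List.foldl_congr_mem
  intro acc x hx
  have hxk : x ∈ ao.map Prod.fst := by
    rw [PySem.List.mem_sorted] at hx
    exact (PySem.List.mem_dedup _ _).mp hx
  have hk : ∃ name, (PySem.Dict.mk ao).get? x = some name := by
    apply Option.isSome_iff_exists.mp
    rw [Option.isSome_iff_ne_none, ne_eq, PySem.Dict.get?_eq_none_iff_not_mem_keys,
      PySem.Dict.keys_mk]
    simpa using hxk
  rcases hk with ⟨name, hn⟩
  by_cases hr : 0 ≤ x ∧ x < (row.length : Int)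
  · rw [if_pos hr, if_pos (show decide (0 ≤ x ∧ x < (row.length : Int)) = true by simpa using hr)]
    rw [PySem.List.pyGet?_eq_some_getElem row hr.1 hr.2]
    simp only [pvBody, hn, PySem.List.pyGetD_eq_getElem row "" hr.1 hr.2, pv_len_beq_zero]
  · rw [if_neg hr, if_neg (by simp [hr])]

-- ===== VERDICT (by name: the statement is the Claim_ definition above) =====
theorem parse_reference_spec : Claim_equal_parse_reference := by
  intro row ao _
  unfold Spec_parse_reference
  rw [pv_A_eq, pv_B_eq, pv_lists_eq]
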